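-- pv_equiv track=rewrite | github.com/JohnSunny21/python-daily-coding | FreeCodeCamp/CodingQ/PerfectSquare.py | is_perfect_square_optimal
-- ===== SOURCE A (Python) =====
-- def is_perfect_square_optimal(n):
--
--     if n < 0:
--         return False
--     if n in (0,1):
--         return True
--
--     low , high = 0 , (n//2) + 1
--
--     while low <= high:
--         mid = (low + high) // 2
--         squared = mid * mid
--
--         if squared == n:
--             return True
--         elif squared < n:
--             low = mid + 1
--         elif squared > n:
--             high = mid - 1
--
--     return False
-- ===== SOURCE B (Python) =====
-- def is_perfect_square_optimal(n):
--     if n < 0: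
--         return False
--     if n in (0, 1):
--         return True
--     x = n
--     while True:
--         y = (x + n // x) // 2
--         if y >= x:
--             break
--         x = y
--     return x * x == n
-- ===== Notes on version B (the rewrite author's own statement) =====
-- stated objective: alternative
-- what changed: Replaces the [low,high] binary search with Newton's integer iteration maintaining a single estimate x that converges to floor(sqrt(n)), then checks x*x == n.
import Mathlib
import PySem

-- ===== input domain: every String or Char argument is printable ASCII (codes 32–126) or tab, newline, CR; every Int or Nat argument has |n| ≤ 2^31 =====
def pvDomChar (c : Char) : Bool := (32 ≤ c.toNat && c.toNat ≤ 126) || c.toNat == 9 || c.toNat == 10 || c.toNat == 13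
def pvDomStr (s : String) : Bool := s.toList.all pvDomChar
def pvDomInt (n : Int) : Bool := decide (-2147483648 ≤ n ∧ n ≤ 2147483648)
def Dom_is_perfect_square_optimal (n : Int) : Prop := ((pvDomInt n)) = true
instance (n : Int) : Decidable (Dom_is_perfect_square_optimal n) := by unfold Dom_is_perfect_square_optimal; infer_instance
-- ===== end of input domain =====

-- B replaces A's binary search over [low, high] with Newton's integer iteration on a
-- single estimate x converging to floor(sqrt(n)); equivalence of the return values is proved.

-- ===== PORT A =====
-- the while loop of A: binary search over [low, high].
-- The Nat fuel only makes the recursion structural; with the fuel A supplies it never runs out.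
def pvALoop (n : Int) : Nat → Int → Int → Bool
  | 0, _, _ => false
  | f + 1, low, high =>
    if low ≤ high then
      let mid := PySem.Int.floordiv (low + high) 2
      let squared := mid * mid
      if squared = n then true
      else if squared < n then pvALoop n f (mid + 1) high
      else pvALoop n f low (mid - 1)
    else false

def is_perfect_square_optimal (n : Int) : Bool :=
  if n < 0 then false
  else if n = 0 ∨ n = 1 then true
  else pvALoop n (PySem.Int.floordiv n 2 + 3).toNat 0 (PySem.Int.floordiv n 2 + 1)

-- ===== PORT B =====
-- the while loop of B: Newton iteration x ↦ (x + n//x)//2 until it stops decreasing.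
-- The Nat fuel only makes the recursion structural; with the fuel B supplies it never runs out.
def pvNewton (n : Int) : Nat → Int → Int
  | 0, x => x
  | f + 1, x =>
    let y := PySem.Int.floordiv (x + PySem.Int.floordiv n x) 2
    if y ≥ x then x else pvNewton n f y

def is_perfect_square_optimal_alt (n : Int) : Bool :=
  if n < 0 then false
  else if n = 0 ∨ n = 1 then true
  else
    let x := pvNewton n n.toNat n
    x * x = n

-- ===== PRECONDITION & SPEC =====
def Spec_is_perfect_square_optimal (n : Int) (out : Bool) : Prop := out = is_perfect_square_optimal_alt n
instance (n : Int) (out : Bool) : Decidable (Spec_is_perfect_square_optimal n out) := by unfold Spec_is_perfect_square_optimal; infer_instance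

-- ===== CLAIM (what is proved, stated in full; the proofs are below) =====
def Claim_equal_is_perfect_square_optimal : Prop := ∀ (n : Int), Dom_is_perfect_square_optimal n → Spec_is_perfect_square_optimal n (is_perfect_square_optimal n)

-- ===== LEMMAS AND PROOFS =====

-- floor(sqrt n) as an Int, the common yardstick of both loops
def pvS (n : Int) : Int := (Nat.sqrt n.toNat : Int)

theorem pvS_nonneg (n : Int) : 0 ≤ pvS n := by
  unfold pvS; positivity

theorem pvS_sq_le (n : Int) (hn : 0 ≤ n) : pvS n * pvS n ≤ n := by
  unfold pvS
  have h : ((Nat.sqrt n.toNat : Int)) * (Nat.sqrt n.toNat : Int) ≤ (n.toNat : Int) := by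
    have hN := Nat.sqrt_le' n.toNat
    rw [pow_two] at hN
    exact_mod_cast hN
  rwa [Int.toNat_of_nonneg hn] at h

theorem pvS_lt_succ_sq (n : Int) : n < (pvS n + 1) * (pvS n + 1) := by
  unfold pvS
  by_cases h : n ≤ 0
  · have h0 : n.toNat = 0 := by omega
    simp [h0]
    omega
  · have h : 0 < n := by omega
    have hh : (n.toNat : Int) < ((Nat.sqrt n.toNat + 1 : Nat) : Int) * ((Nat.sqrt n.toNat + 1 : Nat) : Int) := by
      have hN := Nat.lt_succ_sqrt' n.toNat
      rw [pow_two] at hN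
      exact_mod_cast hN
    rw [Int.toNat_of_nonneg h.le] at hh
    push_cast at hh ⊢
    linarith

theorem pvS_unique (n m : Int) (hm : 0 ≤ m) (h1 : m * m ≤ n) (h2 : n < (m + 1) * (m + 1)) :
    m = pvS n := by
  have hs0 := pvS_nonneg n
  have hs1 := pvS_sq_le n (le_trans (by positivity) h1)
  have hs2 := pvS_lt_succ_sq n
  nlinarith

theorem pvS_one_le (n : Int) (hn : 2 ≤ n) : 1 ≤ pvS n := by
  have h2 := pvS_lt_succ_sq n
  have h0 := pvS_nonneg n
  nlinarith

-- Newton lower bound: one step from any x ≥ 1 stays ≥ floor(sqrt n)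
theorem pvNewton_step_ge (n x : Int) (hn : 2 ≤ n) (hx : 1 ≤ x) :
    pvS n ≤ PySem.Int.floordiv (x + PySem.Int.floordiv n x) 2 := by
  have hx0 : (0:Int) < x := by omega
  rw [PySem.Int.floordiv_eq_ediv_of_pos hx0, PySem.Int.floordiv_eq_ediv_of_pos (by omega : (0:Int) < 2)]
  set q := n / x with hq
  set y := (x + q) / 2 with hy
  have hqr : x * q + n % x = n := by rw [hq]; exact Int.ediv_add_emod n x
  have hr0 : 0 ≤ n % x := Int.emod_nonneg n (by omega)
  have hr1 : n % x < x := Int.emod_lt_of_pos n hx0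
  have hyr : 2 * y + (x + q) % 2 = x + q := by rw [hy]; omega
  have hr20 : 0 ≤ (x + q) % 2 := Int.emod_nonneg _ (by omega)
  have hr21 : (x + q) % 2 < 2 := Int.emod_lt_of_pos _ (by omega)
  have hq0 : 0 ≤ q := by positivity
  have hy0 : 0 ≤ y := by omega
  -- n < (y+1)^2, from 4n < (x+q+1)^2 ≤ (2(y+1))^2
  have key : n < (y + 1) * (y + 1) := by nlinarith [sq_nonneg (x - q - 1), sq_nonneg (x + q + 1 - 2 * (y + 1))]
  have hs0 := pvS_nonneg n
  have hs1 := pvS_sq_le n (by omega)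
  nlinarith

theorem pvNewton_eq (n : Int) (hn : 2 ≤ n) :
    ∀ (f : Nat) (x : Int), pvS n ≤ x → (x - pvS n).toNat ≤ f → pvNewton n f x = pvS n := by
  intro f
  induction f with
  | zero => intro x hx hf; have : x = pvS n := by omega
            simpa [pvNewton, this]
  | succ f ih =>
    intro x hx hf
    have hs1 := pvS_one_le n hn
    have hx1 : 1 ≤ x := by omega
    have hge := pvNewton_step_ge n x hn hx1
    simp only [pvNewton]
    split
    · -- y ≥ x : the loop stops, and then x = pvS n
      rename_i hyx
      rw [PySem.Int.floordiv_eq_ediv_of_pos (by omega : (0:Int) < x),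
          PySem.Int.floordiv_eq_ediv_of_pos (by omega : (0:Int) < 2)] at hyx
      set q := n / x with hq
      set y := (x + q) / 2 with hy
      have hqr : x * q + n % x = n := by rw [hq]; exact Int.ediv_add_emod n x
      have hr0 : 0 ≤ n % x := Int.emod_nonneg n (by omega)
      have hyr : 2 * y + (x + q) % 2 = x + q := by rw [hy]; omega
      have hr21 : (x + q) % 2 < 2 := Int.emod_lt_of_pos _ (by omega)
      have hr20 : 0 ≤ (x + q) % 2 := Int.emod_nonneg _ (by omega)
      have hs2 := pvS_lt_succ_sq n
      have hs0 := pvS_nonneg n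
      -- from y ≥ x: q ≥ x, hence x * x ≤ n, hence x ≤ pvS n
      have hxq : x ≤ q := by omega
      have hxx : x * x ≤ n := by nlinarith
      have hle : x ≤ pvS n := by nlinarith
      omega
    · rename_i hyx
      push_neg at hyx
      exact ih _ hge (by omega)

-- A's loop computes "pvS n is an exact root", given the binary-search invariant and enough fuel
theorem pvALoop_eq (n : Int) (hn : 2 ≤ n) :
    ∀ (f : Nat) (low high : Int), (high - low + 1).toNat < f → 0 ≤ low →
      (pvS n * pvS n = n → low ≤ pvS n ∧ pvS n ≤ high) →
      pvALoop n f low high = decide (pvS n * pvS n = n) := by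
  intro f
  induction f with
  | zero => intro low high hf; omega
  | succ f ih =>
    intro low high hf hl hinv
    by_cases hle : low ≤ high
    · have hb := PySem.Int.floordiv_two_mid_bounds hle
      have hs0 := pvS_nonneg n
      set mid := PySem.Int.floordiv (low + high) 2 with hm
      have hstep : pvALoop n (f + 1) low high =
          (if mid * mid = n then true
           else if mid * mid < n then pvALoop n f (mid + 1) high
           else pvALoop n f low (mid - 1)) := by
        simp only [pvALoop, if_pos hle, ← hm]
      by_cases hsq : mid * mid = n
      · -- the loop returns true, and mid is pvS n
        have hmid0 : 0 ≤ mid := by omega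
        have hms : mid = pvS n := pvS_unique n mid hmid0 (le_of_eq hsq) (by nlinarith)
        have hroot : pvS n * pvS n = n := by rw [← hms]; exact hsq
        rw [hstep, if_pos hsq]
        exact (decide_eq_true hroot).symm
      · by_cases hlt : mid * mid < n
        · -- recurse with low = mid + 1
          have hrec := ih (mid + 1) high (by omega) (by omega) (by
            intro hroot
            refine ⟨?_, (hinv hroot).2⟩
            by_contra hcon
            have hms : pvS n ≤ mid := by omega
            nlinarith)
          rw [hstep, if_neg hsq, if_pos hlt]
          exact hrec
        · -- recurse with high = mid - 1
          have hgt : n < mid * mid := by omega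
          have hrec := ih low (mid - 1) (by omega) hl (by
            intro hroot
            refine ⟨(hinv hroot).1, ?_⟩
            by_contra hcon
            have hms : mid ≤ pvS n := by omega
            nlinarith)
          rw [hstep, if_neg hsq, if_neg hlt]
          exact hrec
    · -- low > high : the loop returns false, and pvS n cannot be a root
      have hno : ¬ (pvS n * pvS n = n) := fun hroot => by have := hinv hroot; omega
      simp [pvALoop, hle, hno]

-- ===== VERDICT (by name: the statement is the Claim_ definition above) =====
theorem is_perfect_square_optimal_spec : Claim_equal_is_perfect_square_optimal := by
  intro n _
  unfold Spec_is_perfect_square_optimal is_perfect_square_optimal is_perfect_square_optimal_alt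
  by_cases hneg : n < 0
  · simp [hneg]
  · by_cases h01 : n = 0 ∨ n = 1
    · simp [hneg, h01]
    · have hn : 2 ≤ n := by omega
      simp only [hneg, h01, if_false]
      have hs0 := pvS_nonneg n
      have hs1 := pvS_one_le n hn
      have hs2 := pvS_sq_le n (by omega)
      -- B's side: the Newton loop computes pvS n
      have hB : pvNewton n n.toNat n = pvS n := by
        apply pvNewton_eq n hn
        · nlinarith
        · omega
      -- A's side: the binary search decides whether pvS n is an exact root
      have h2 : PySem.Int.floordiv n 2 = n / 2 := PySem.Int.floordiv_eq_ediv_of_pos (by omega)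
      have hA : pvALoop n (PySem.Int.floordiv n 2 + 3).toNat 0 (PySem.Int.floordiv n 2 + 1)
          = decide (pvS n * pvS n = n) := by
        apply pvALoop_eq n hn _ 0 _ (by omega) le_rfl
        intro hroot
        refine ⟨hs0, ?_⟩
        have : 2 * pvS n ≤ n + 1 := by nlinarith [sq_nonneg (pvS n - 1)]
        omega
      rw [hA, hB]
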